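-- pv_equiv track=rewrite | github.com/ZCrystalC33/trade-core | scripts/setup_cron.py | remove_old_entries
-- ===== SOURCE A (Python) =====
-- CRON_TAG  = "# tradecore-daily-pipeline"
--
-- CRON_END  = "# tradecore-daily-pipeline-end"
--
-- def remove_old_entries(cron: str) -> str:
--     """移除舊的 tradecore cron 區塊（若存在）"""
--     lines = cron.splitlines()
--     new_lines = []
--     in_block = False
--     for line in lines:
--         if line.strip() == CRON_TAG:
--             in_block = True
--             continue
--         if in_block:
--             # 遇到 end tag 或下一個以 # 開頭的非 tag 行（保護用）
--             if line.strip() == CRON_END: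
--                 in_block = False
--             continue
--         new_lines.append(line)
--     return "\n".join(new_lines).rstrip() + "\n"
-- ===== SOURCE B (Python) =====
-- CRON_TAG  = "# tradecore-daily-pipeline"
--
-- CRON_END  = "# tradecore-daily-pipeline-end"
--
-- def remove_old_entries(cron: str) -> str:
--     """Remove the tagged tradecore cron block by find-and-skip over the list tail."""
--     new_lines = []
--     rest = cron.splitlines()
--     while rest:
--         line, rest = rest[0], rest[1:]
--         if line.strip() == CRON_TAG:
--             # skip everything up to and including the end tag (or to EOF)
--             while rest and rest[0].strip() != CRON_END:
--                 rest = rest[1:]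
--             rest = rest[1:]
--         else:
--             new_lines.append(line)
--     return "\n".join(new_lines).rstrip() + "\n"
-- ===== Notes on version B (the rewrite author's own statement) =====
-- stated objective: alternative
-- what changed: Replaces A's in_block flag carried through a single flat loop with a nested find-and-skip traversal: on hitting the tag line, an inner loop drops lines up to and including the end tag (or to EOF), so no boolean state survives between lines.
import Mathlib
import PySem

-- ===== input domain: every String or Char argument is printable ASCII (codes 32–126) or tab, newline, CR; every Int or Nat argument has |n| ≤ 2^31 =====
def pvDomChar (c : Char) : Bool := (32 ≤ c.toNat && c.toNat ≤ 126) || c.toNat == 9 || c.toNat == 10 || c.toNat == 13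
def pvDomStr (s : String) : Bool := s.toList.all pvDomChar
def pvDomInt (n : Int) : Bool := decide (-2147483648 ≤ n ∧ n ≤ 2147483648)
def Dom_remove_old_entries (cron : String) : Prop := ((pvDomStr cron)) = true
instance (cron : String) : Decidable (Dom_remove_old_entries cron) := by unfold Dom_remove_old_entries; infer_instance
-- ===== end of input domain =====

-- B replaces A's in_block flag with a nested find-and-skip traversal of the line list (objective: alternative decomposition, same cost).

def pvCronTag : String := "# tradecore-daily-pipeline"
def pvCronEnd : String := "# tradecore-daily-pipeline-end"

-- ===== PORT A =====
-- A's loop body: state = (new_lines, in_block)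
def pvAStep (st : List String × Bool) (line : String) : List String × Bool :=
  if PySem.Str.strip line == pvCronTag then (st.1, true)
  else if st.2 then
    (if PySem.Str.strip line == pvCronEnd then (st.1, false) else (st.1, true))
  else (st.1 ++ [line], st.2)

def remove_old_entries (cron : String) : String :=
  let lines := PySem.Str.splitlines cron
  let st := lines.foldl pvAStep ([], false)
  PySem.Str.rstrip (PySem.Str.join "\n" st.1) ++ "\n"

-- ===== PORT B =====
-- inner while: drop lines up to and including the end tag (or to the end)
def pvSkipBlock : List String → List String
  | [] => []
  | l :: ls => if PySem.Str.strip l == pvCronEnd then ls else pvSkipBlock ls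

theorem pvSkipBlock_length (ls : List String) : (pvSkipBlock ls).length ≤ ls.length := by
  induction ls with
  | nil => simp [pvSkipBlock]
  | cons l ls ih =>
    simp only [pvSkipBlock]
    split
    · simp
    · exact Nat.le_trans ih (Nat.le_succ _)

-- outer while over the remaining lines, accumulating new_lines
def pvBGo : List String → List String → List String
  | [], acc => acc
  | l :: ls, acc =>
    if PySem.Str.strip l == pvCronTag then pvBGo (pvSkipBlock ls) acc
    else pvBGo ls (acc ++ [l])
termination_by ls _ => ls.length
decreasing_by
  · exact Nat.lt_succ_of_le (pvSkipBlock_length ls)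
  · exact Nat.lt_succ_self _

def remove_old_entries_alt (cron : String) : String :=
  let lines := PySem.Str.splitlines cron
  PySem.Str.rstrip (PySem.Str.join "\n" (pvBGo lines [])) ++ "\n"

-- ===== PRECONDITION & SPEC =====
def Spec_remove_old_entries (cron : String) (out : String) : Prop := out = remove_old_entries_alt cron
instance (cron : String) (out : String) : Decidable (Spec_remove_old_entries cron out) := by unfold Spec_remove_old_entries; infer_instance

-- ===== CLAIM (what is proved, stated in full; the proofs are below) =====
def Claim_equal_remove_old_entries : Prop := ∀ (cron : String), Dom_remove_old_entries cron → Spec_remove_old_entries cron (remove_old_entries cron)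

-- ===== LEMMAS AND PROOFS =====

-- While A's flag is set, its fold skips exactly the lines pvSkipBlock drops.
theorem pvFold_true_eq_skip (ls : List String) (acc : List String) :
    (List.foldl pvAStep (acc, true) ls).1 = (List.foldl pvAStep (acc, false) (pvSkipBlock ls)).1 := by
  induction ls with
  | nil => simp [pvSkipBlock]
  | cons l ls ih =>
    by_cases htag : PySem.Str.strip l = pvCronTag
    · have hend : (PySem.Str.strip l == pvCronEnd) = false := by
        simp [htag, pvCronTag, pvCronEnd]
      simp only [List.foldl_cons, pvAStep, htag, pvSkipBlock]
      simpa using ih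
    · by_cases hend : PySem.Str.strip l = pvCronEnd
      · have hne : ¬ (pvCronEnd = pvCronTag) := by decide
        simp [List.foldl_cons, pvAStep, hend, pvSkipBlock, hne]
      · simp only [List.foldl_cons, pvAStep, pvSkipBlock,
          beq_iff_eq, htag, hend, if_false, if_true]
        simpa [htag, hend] using ih

-- Outside a block, A's fold produces exactly B's find-and-skip result.
theorem pvFold_false_eq_bGo (n : Nat) :
    ∀ (ls : List String), ls.length ≤ n → ∀ (acc : List String),
      (List.foldl pvAStep (acc, false) ls).1 = pvBGo ls acc := by
  induction n with
  | zero =>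
    intro ls hls acc
    have : ls = [] := List.eq_nil_of_length_eq_zero (Nat.le_zero.mp hls)
    subst this; simp [pvBGo]
  | succ n ih =>
    intro ls hls acc
    cases ls with
    | nil => simp [pvBGo]
    | cons l ls =>
      by_cases htag : PySem.Str.strip l = pvCronTag
      · have h1 : (List.foldl pvAStep (acc, false) (l :: ls)).1
            = (List.foldl pvAStep (acc, false) (pvSkipBlock ls)).1 := by
          simp only [List.foldl_cons, pvAStep, htag]
          simpa using pvFold_true_eq_skip ls acc
        rw [h1, ih _ (Nat.le_trans (pvSkipBlock_length ls) (Nat.le_of_succ_le_succ hls))]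
        simp [pvBGo, htag]
      · have h1 : List.foldl pvAStep (acc, false) (l :: ls)
            = List.foldl pvAStep (acc ++ [l], false) ls := by
          simp [List.foldl_cons, pvAStep, htag]
        rw [h1, ih _ (Nat.le_of_succ_le_succ hls)]
        simp [pvBGo, htag]

-- ===== VERDICT (by name: the statement is the Claim_ definition above) =====
theorem remove_old_entries_spec : Claim_equal_remove_old_entries := by
  intro cron _
  unfold Spec_remove_old_entries remove_old_entries remove_old_entries_alt
  simp only []
  rw [pvFold_false_eq_bGo (PySem.Str.splitlines cron).length _ (Nat.le_refl _) []]
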